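-- pv_equiv track=rewrite | github.com/aamit2267/nexusops-ai | packages/core_utils/core_utils/security.py | has_required_scope
-- ===== SOURCE A (Python) =====
-- from typing import List
--
-- def has_required_scope(user_scopes: List[str], required_scopes: List[str]) -> bool:
--     if "superadmin" in user_scopes:
--         return True
--
--     for required in required_scopes:
--         if required not in user_scopes:
--             resource = required.split(":")[0]
--             if f"{resource}:*" not in user_scopes:
--                 return False
--     return True
-- ===== SOURCE B (Python) =====
-- from typing import List
--
-- def has_required_scope(user_scopes: List[str], required_scopes: List[str]) -> bool:
--     if "superadmin" in user_scopes:
--         return True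
--     # worklist elimination: each user scope removes the required scopes it covers
--     remaining = set(required_scopes)
--     for s in user_scopes:
--         if s.endswith(":*"):
--             res = s[:-2]
--             remaining = {r for r in remaining if r != s and r.split(":")[0] != res}
--         else:
--             remaining.discard(s)
--     return not remaining
-- ===== Notes on version B (the rewrite author's own statement) =====
-- stated objective: alternative
-- what changed: B inverts the traversal: instead of A's loop over required_scopes scanning user_scopes per item, B turns required_scopes into a worklist set and makes one pass over user_scopes, each user scope eliminating the required scopes it covers (exact match, or same resource for ':*' scopes); the answer is whether the worklist is empty.
import Mathlib
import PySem

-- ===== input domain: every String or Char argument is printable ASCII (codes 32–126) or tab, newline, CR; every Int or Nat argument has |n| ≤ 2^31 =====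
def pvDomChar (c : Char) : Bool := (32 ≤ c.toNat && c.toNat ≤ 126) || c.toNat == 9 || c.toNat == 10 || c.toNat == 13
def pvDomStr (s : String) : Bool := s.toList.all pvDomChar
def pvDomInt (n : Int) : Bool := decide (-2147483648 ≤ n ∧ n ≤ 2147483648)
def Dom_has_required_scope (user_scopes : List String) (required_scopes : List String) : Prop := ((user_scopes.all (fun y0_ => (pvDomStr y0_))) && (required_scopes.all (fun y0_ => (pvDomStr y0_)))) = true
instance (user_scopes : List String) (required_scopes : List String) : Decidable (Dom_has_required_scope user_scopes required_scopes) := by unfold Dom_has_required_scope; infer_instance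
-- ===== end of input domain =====

-- B inverts the traversal: one pass over user_scopes eliminates covered scopes from a
-- required-scope worklist set; answer = worklist empty. Objective: alternative. Return values only.

-- ===== PORT A =====
-- the 'for required in required_scopes' loop of A, returning False on the first miss
def hrsGo (user_scopes : List String) : List String → Bool
  | [] => true
  | required :: rest =>
    if !(user_scopes.contains required) then
      let resource := (PySem.List.pyGet? ((PySem.Str.split? required ":").getD []) 0).getD ""
      if !(user_scopes.contains (resource ++ ":*")) then false
      else hrsGo user_scopes rest
    else hrsGo user_scopes rest

def has_required_scope (user_scopes : List String) (required_scopes : List String) : Bool :=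
  if user_scopes.contains "superadmin" then true
  else hrsGo user_scopes required_scopes

-- ===== PORT B =====
-- one iteration of B's 'for s in user_scopes' loop on the worklist set 'remaining';
-- the set comprehension is Set.filter on the element list (result is a Set, order not consumed)
def hrsbStep (remaining : PySem.Set String) (s : String) : PySem.Set String :=
  if PySem.Str.endswith s ":*" then
    let res := PySem.Str.slice s none (some (-2))
    remaining.filter (fun r =>
      !(r == s) && !(((PySem.List.pyGet? ((PySem.Str.split? r ":").getD []) 0).getD "") == res))
  else PySem.Set.discard remaining s

def has_required_scope_alt (user_scopes : List String) (required_scopes : List String) : Bool :=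
  if user_scopes.contains "superadmin" then true
  else (user_scopes.foldl hrsbStep (PySem.Set.ofList required_scopes)).isEmpty

-- ===== PRECONDITION & SPEC =====
def Spec_has_required_scope (user_scopes : List String) (required_scopes : List String) (out : Bool) : Prop := out = has_required_scope_alt user_scopes required_scopes
instance (user_scopes : List String) (required_scopes : List String) (out : Bool) : Decidable (Spec_has_required_scope user_scopes required_scopes out) := by unfold Spec_has_required_scope; infer_instance

-- ===== CLAIM (what is proved, stated in full; the proofs are below) =====
def Claim_equal_has_required_scope : Prop := ∀ (user_scopes : List String) (required_scopes : List String), Dom_has_required_scope user_scopes required_scopes → Spec_has_required_scope user_scopes required_scopes (has_required_scope user_scopes required_scopes)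

-- ===== LEMMAS AND PROOFS =====

-- first component of required.split(":")
def resOf (r : String) : String :=
  (PySem.List.pyGet? ((PySem.Str.split? r ":").getD []) 0).getD ""

-- 'user scope s covers required scope r' — the elimination test of one step of B
def covers (s r : String) : Bool :=
  (r == s) || (PySem.Str.endswith s ":*" && (resOf r == PySem.Str.slice s none (some (-2))))

-- s ends with ":*" and s[:-2] = t  ⟺  s = t ++ ":*"
lemma endswith_slice_iff (s t : String) :
    (PySem.Str.endswith s ":*" = true ∧ PySem.Str.slice s none (some (-2)) = t) ↔
      s = t ++ ":*" := by
  have hsl : (PySem.Str.slice s none (some (-2))).toList = s.toList.take (s.toList.length - 2) := by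
    rw [PySem.Str.toList_slice, PySem.Chars.slice_eq_listSlice,
      PySem.List.slice_to_neg_ofNat _ 2 (by omega)]
  constructor
  · rintro ⟨h1, h2⟩
    rw [PySem.Str.endswith_eq, PySem.Chars.endswith_iff] at h1
    obtain ⟨pre, hpre⟩ := h1
    apply String.toList_inj.mp
    rw [String.toList_append, ← hpre]
    have ht : t.toList = pre := by
      rw [← h2, hsl, ← hpre]
      have : (pre ++ (":*" : String).toList).length - 2 = pre.length := by
        simp
      rw [this]
      exact List.take_left' rfl
    rw [ht]
  · rintro rfl
    refine ⟨?_, ?_⟩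
    · rw [PySem.Str.endswith_eq, PySem.Chars.endswith_iff]
      exact ⟨t.toList, by rw [String.toList_append]⟩
    · apply String.toList_inj.mp
      rw [hsl, String.toList_append]
      have h : (t.toList ++ (":*" : String).toList).length - 2 = t.toList.length := by
        simp
      rw [h]
      exact List.take_left' rfl

-- membership after one elimination step
lemma mem_hrsbStep (rem : PySem.Set String) (s r : String) :
    r ∈ hrsbStep rem s ↔ r ∈ rem ∧ covers s r = false := by
  unfold hrsbStep covers resOf
  by_cases hc : PySem.Chars.endswith s.toList [':', '*'] = true
  · simp [PySem.Str.endswith_eq, hc, List.mem_filter]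
  · simp [PySem.Str.endswith_eq, hc, PySem.Set.mem_discard]

-- membership after the whole pass over user_scopes
lemma mem_fold (us : List String) (init : PySem.Set String) (r : String) :
    r ∈ us.foldl hrsbStep init ↔ r ∈ init ∧ ∀ s ∈ us, covers s r = false := by
  induction us generalizing init with
  | nil => simp
  | cons s rest ih =>
    simp only [List.foldl_cons, ih, mem_hrsbStep, List.mem_cons]
    constructor
    · rintro ⟨⟨h1, h2⟩, h3⟩
      refine ⟨h1, ?_⟩
      rintro t (rfl | ht)
      · exact h2
      · exact h3 t ht
    · rintro ⟨h1, h2⟩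
      exact ⟨⟨h1, h2 s (Or.inl rfl)⟩, fun t ht => h2 t (Or.inr ht)⟩

-- some user scope covers r  ⟺  A's two membership tests for r
lemma covers_exists_iff (us : List String) (r : String) :
    (∃ s ∈ us, covers s r = true) ↔ (r ∈ us ∨ (resOf r ++ ":*") ∈ us) := by
  constructor
  · rintro ⟨s, hs, hc⟩
    unfold covers at hc
    rcases Bool.or_eq_true_iff.mp hc with h | h
    · left; rwa [← eq_of_beq h] at hs
    · right
      obtain ⟨h1, h2⟩ := Bool.and_eq_true_iff.mp h
      rw [(endswith_slice_iff s (resOf r)).mp ⟨h1, (eq_of_beq h2).symm⟩] at hs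
      exact hs
  · rintro (h | h)
    · exact ⟨r, h, by unfold covers; simp⟩
    · refine ⟨resOf r ++ ":*", h, ?_⟩
      have h12 := (endswith_slice_iff (resOf r ++ ":*") (resOf r)).mpr rfl
      unfold covers
      rw [h12.1, h12.2]
      simp

-- A's loop is an 'all' over required_scopes
lemma hrsGo_eq_all (us : List String) (rs : List String) :
    hrsGo us rs = rs.all (fun r => us.contains r || us.contains (resOf r ++ ":*")) := by
  induction rs with
  | nil => rfl
  | cons r rest ih =>
    simp only [hrsGo, List.all_cons, ih, resOf]
    by_cases h1 : r ∈ us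
    · simp [h1]
    · by_cases h2 : ((PySem.List.pyGet? ((PySem.Str.split? r ":").getD []) 0).getD "" ++ ":*") ∈ us
      · simp [h1, h2]
      · simp [h1, h2]

-- ===== VERDICT (by name: the statement is the Claim_ definition above) =====
theorem has_required_scope_spec : Claim_equal_has_required_scope := by
  intro us rs _
  unfold Spec_has_required_scope has_required_scope has_required_scope_alt
  by_cases hsa : "superadmin" ∈ us
  · simp [hsa]
  · simp only [List.contains_iff_mem, hsa, if_false]
    rw [Bool.eq_iff_iff, List.isEmpty_iff, List.eq_nil_iff_forall_not_mem, hrsGo_eq_all]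
    simp only [List.all_eq_true, Bool.or_eq_true, List.contains_iff_mem, mem_fold,
      PySem.Set.mem_ofList, not_and, not_forall]
    constructor
    · intro h r hr
      obtain ⟨s, hs, hc⟩ := (covers_exists_iff us r).mpr (h r hr)
      exact ⟨s, hs, by simp [hc]⟩
    · intro h r hr
      obtain ⟨s, hs, hc⟩ := h r hr
      exact (covers_exists_iff us r).mp ⟨s, hs, by simpa using hc⟩
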